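-- pv_equiv track=rewrite | github.com/thallesnct/graph-cycles | graph.py | is_edge_path_in_cycle_list
-- ===== SOURCE A (Python) =====
-- def is_edge_path_in_cycle_list(edge_path, cycle_list):
--   is_in_list = False
--
--   for edge_set in cycle_list:
--     if len(edge_set) != len(edge_path):
--       continue
--
--     set_diff = edge_set.difference(edge_path)
--
--     if len(set_diff) == 0:
--       is_in_list = True
--
--   return is_in_list
-- ===== SOURCE B (Python) =====
-- def is_edge_path_in_cycle_list(edge_path, cycle_list):
--   target = sorted(edge_path)
--   for edge_set in cycle_list:
--     if sorted(edge_set) == target: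
--       return True
--   return False
-- ===== Notes on version B (the rewrite author's own statement) =====
-- stated objective: alternative
-- what changed: Replaces A's flag-accumulating loop with a per-cycle length check plus set difference by sorting the path once into a canonical ordered form and doing an early-exit scan that compares each cycle's sorted form for ordered equality.
import Mathlib
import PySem

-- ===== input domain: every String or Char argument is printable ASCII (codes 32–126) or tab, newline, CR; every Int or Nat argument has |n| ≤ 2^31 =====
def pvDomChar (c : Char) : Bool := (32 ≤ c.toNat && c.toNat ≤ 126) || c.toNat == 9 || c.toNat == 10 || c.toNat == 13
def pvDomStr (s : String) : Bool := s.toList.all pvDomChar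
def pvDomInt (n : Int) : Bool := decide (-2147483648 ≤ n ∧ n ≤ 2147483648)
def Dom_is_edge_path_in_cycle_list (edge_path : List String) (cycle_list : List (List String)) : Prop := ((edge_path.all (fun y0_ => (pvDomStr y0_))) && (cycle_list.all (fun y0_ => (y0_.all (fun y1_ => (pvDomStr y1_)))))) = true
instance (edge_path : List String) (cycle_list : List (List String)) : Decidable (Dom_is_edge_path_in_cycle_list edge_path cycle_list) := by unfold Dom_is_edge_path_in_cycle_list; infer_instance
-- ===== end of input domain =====

-- B replaces A's flag-accumulating loop with per-cycle length check plus set difference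
-- by sorting the path once into a canonical ordered form and doing an early-exit scan
-- comparing each cycle's sorted form (alternative decomposition; same answer).

-- ===== PORT A =====
def is_edge_path_in_cycle_list (edge_path : List String) (cycle_list : List (List String)) : Bool :=
  cycle_list.foldl (fun is_in_list edge_set =>
    if PySem.Set.len edge_set ≠ PySem.Set.len edge_path then is_in_list
    else
      let set_diff := PySem.Set.diff edge_set edge_path
      if PySem.Set.len set_diff = 0 then true else is_in_list) false

-- ===== PORT B =====
-- B's early-exit for-loop: structural recursion over cycle_list, returning at first match.
def pvScan (target : List String) : List (List String) → Bool
  | [] => false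
  | edge_set :: rest =>
      if PySem.List.sorted edge_set (fun x => x) false = target then true
      else pvScan target rest

def is_edge_path_in_cycle_list_alt (edge_path : List String) (cycle_list : List (List String)) : Bool :=
  let target := PySem.List.sorted edge_path (fun x => x) false
  pvScan target cycle_list

-- ===== PRECONDITION & SPEC =====
-- The Python arguments are a set and a list of sets; Pre_ admits exactly the lists that
-- encode them (no duplicate elements inside edge_path or inside any cycle) — a list with
-- duplicates corresponds to no Python input, so nothing A returns on is excluded.
def Pre_is_edge_path_in_cycle_list (edge_path : List String) (cycle_list : List (List String)) : Prop :=
  edge_path.Nodup ∧ ∀ s ∈ cycle_list, s.Nodup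
instance (edge_path : List String) (cycle_list : List (List String)) : Decidable (Pre_is_edge_path_in_cycle_list edge_path cycle_list) := by unfold Pre_is_edge_path_in_cycle_list; infer_instance

def pvWitness_is_edge_path_in_cycle_list : List String × List (List String) :=
  (["a", "b"], [["c"], ["b", "a"]])

def Spec_is_edge_path_in_cycle_list (edge_path : List String) (cycle_list : List (List String)) (out : Bool) : Prop := out = is_edge_path_in_cycle_list_alt edge_path cycle_list
instance (edge_path : List String) (cycle_list : List (List String)) (out : Bool) : Decidable (Spec_is_edge_path_in_cycle_list edge_path cycle_list out) := by unfold Spec_is_edge_path_in_cycle_list; infer_instance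

-- ===== CLAIM =====
def Claim_equal_is_edge_path_in_cycle_list : Prop := ∀ (edge_path : List String) (cycle_list : List (List String)), Dom_is_edge_path_in_cycle_list edge_path cycle_list → Pre_is_edge_path_in_cycle_list edge_path cycle_list → Spec_is_edge_path_in_cycle_list edge_path cycle_list (is_edge_path_in_cycle_list edge_path cycle_list)

-- ===== LEMMAS AND PROOFS =====

-- pointwise: A's per-cycle test (equal size and empty set difference) holds iff the
-- two sorted forms agree, given both lists encode sets (nodup)
theorem pv_hit_iff (ep s : List String) (_hep : ep.Nodup) (hs : s.Nodup) :
    ((s.length = ep.length ∧ PySem.Set.diff s ep = []) ↔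
      PySem.List.sorted s (fun x => x) false = PySem.List.sorted ep (fun x => x) false) := by
  have hsub : PySem.Set.diff s ep = [] ↔ s ⊆ ep := by
    rw [List.eq_nil_iff_forall_not_mem]
    constructor
    · intro h x hx
      by_contra hnx
      exact h x ((PySem.Set.mem_diff _ _ _).2 ⟨hx, hnx⟩)
    · intro h x hx
      rcases (PySem.Set.mem_diff _ _ _).1 hx with ⟨h1, h2⟩
      exact h2 (h h1)
  rw [hsub, PySem.List.sorted_id_eq_sorted_id_iff_perm]
  constructor
  · rintro ⟨hlen, hss⟩
    exact ((hs.subperm hss).perm_of_length_le (le_of_eq hlen.symm))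
  · intro hperm
    exact ⟨hperm.length_eq, hperm.subset⟩

-- A's loop, on valid set encodings, computes "b or some cycle sorts to ep's sorted form"
theorem pv_loop_eq (ep : List String) (hep : ep.Nodup) (l : List (List String)) (b : Bool)
    (hl : ∀ s ∈ l, s.Nodup) :
    l.foldl (fun is_in_list edge_set =>
      if PySem.Set.len edge_set ≠ PySem.Set.len ep then is_in_list
      else
        let set_diff := PySem.Set.diff edge_set ep
        if PySem.Set.len set_diff = 0 then true else is_in_list) b
    = (b || l.any (fun s => decide (PySem.List.sorted s (fun x => x) false = PySem.List.sorted ep (fun x => x) false))) := by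
  induction l generalizing b with
  | nil => simp
  | cons x xs ih =>
    have hx : x.Nodup := hl x (by simp)
    have hxs : ∀ s ∈ xs, s.Nodup := fun s hs => hl s (List.mem_cons_of_mem _ hs)
    have heq : (if PySem.Set.len x ≠ PySem.Set.len ep then b
        else if PySem.Set.len (PySem.Set.diff x ep) = 0 then true else b)
        = (b || decide (PySem.List.sorted x (fun x => x) false = PySem.List.sorted ep (fun x => x) false)) := by
      have hiff := pv_hit_iff ep x hep hx
      simp only [PySem.Set.len] at *
      by_cases hc : PySem.List.sorted x (fun x => x) false = PySem.List.sorted ep (fun x => x) false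
      · rcases hiff.2 hc with ⟨h1, h2⟩
        simp [hc, h1, h2]
      · simp only [hc, decide_false, Bool.or_false]
        by_cases h1 : x.length = ep.length
        · have h2 : ¬ PySem.Set.diff x ep = [] := fun h2 => hc (hiff.1 ⟨h1, h2⟩)
          simp [h1, h2]
        · simp [h1]
    simp only [List.foldl_cons, List.any_cons, heq, ih _ hxs, Bool.or_assoc]

-- B's early-exit scan is the same "any" over the list
theorem pv_scan_eq (target : List String) (l : List (List String)) :
    pvScan target l = l.any (fun s => decide (PySem.List.sorted s (fun x => x) false = target)) := by
  induction l with
  | nil => rfl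
  | cons x xs ih =>
    by_cases h : PySem.List.sorted x (fun x => x) false = target <;>
      simp [pvScan, h, ih]

-- ===== VERDICT =====
theorem is_edge_path_in_cycle_list_spec : Claim_equal_is_edge_path_in_cycle_list := by
  intro ep cl _ hpre
  rcases hpre with ⟨hep, hcl⟩
  unfold Spec_is_edge_path_in_cycle_list is_edge_path_in_cycle_list is_edge_path_in_cycle_list_alt
  rw [pv_loop_eq ep hep cl false hcl, Bool.false_or, pv_scan_eq]
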